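-- pv_equiv track=rewrite | github.com/LIULINKAI/ROAD-R-NIPS2023 | utils/act-and-loc-data_processor.py | filter_action_labels
-- ===== SOURCE A (Python) =====
-- def filter_action_labels(action_labels):
--     filter_cls_id = [6, 14, 15]
--     new_labels = []
--     for idx, conf in enumerate(action_labels):
--         if idx in filter_cls_id:
--             continue
--         new_labels.append(conf)
--     return new_labels
-- ===== SOURCE B (Python) =====
-- def filter_action_labels(action_labels):
--     action_labels = list(action_labels)
--     return action_labels[:6] + action_labels[7:14] + action_labels[16:]
-- ===== Notes on version B (the rewrite author's own statement) =====
-- stated objective: simpler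
-- what changed: Replaces the index-by-index scan with a per-element membership skip test by a closed-form concatenation of the three surviving contiguous slices [:6] + [7:14] + [16:].
import Mathlib
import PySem

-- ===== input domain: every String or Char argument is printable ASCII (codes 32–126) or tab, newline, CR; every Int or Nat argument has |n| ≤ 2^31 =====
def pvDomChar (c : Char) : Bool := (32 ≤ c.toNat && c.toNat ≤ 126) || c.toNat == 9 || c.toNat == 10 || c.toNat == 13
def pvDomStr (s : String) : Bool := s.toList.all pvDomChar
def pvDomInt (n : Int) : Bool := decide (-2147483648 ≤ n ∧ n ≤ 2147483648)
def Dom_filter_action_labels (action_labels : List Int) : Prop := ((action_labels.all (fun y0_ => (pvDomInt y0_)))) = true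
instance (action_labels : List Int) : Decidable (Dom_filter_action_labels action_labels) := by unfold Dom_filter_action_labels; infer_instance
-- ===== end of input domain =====

-- B replaces A's index-by-index scan (skip idx ∈ {6,14,15}) by the closed-form
-- concatenation of the three surviving slices [:6] + [7:14] + [16:] (objective: simpler).

-- ===== PORT A =====
def filter_action_labels (action_labels : List Int) : List Int :=
  let filter_cls_id : List Int := [6, 14, 15]
  (PySem.List.enumerate action_labels 0).foldl
    (fun new_labels (p : Int × Int) =>
      if p.1 ∈ filter_cls_id then new_labels else new_labels ++ [p.2]) []

-- ===== PORT B =====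
def filter_action_labels_alt (action_labels : List Int) : List Int :=
  PySem.List.slice action_labels none (some 6)
    ++ PySem.List.slice action_labels (some 7) (some 14)
    ++ PySem.List.slice action_labels (some 16) none

-- ===== PRECONDITION & SPEC =====
def Spec_filter_action_labels (action_labels : List Int) (out : List Int) : Prop := out = filter_action_labels_alt action_labels
instance (action_labels : List Int) (out : List Int) : Decidable (Spec_filter_action_labels action_labels out) := by unfold Spec_filter_action_labels; infer_instance

-- ===== CLAIM (what is proved, stated in full; the proofs are below) =====
def Claim_equal_filter_action_labels : Prop := ∀ (action_labels : List Int), Dom_filter_action_labels action_labels → Spec_filter_action_labels action_labels (filter_action_labels action_labels)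

-- ===== LEMMAS AND PROOFS =====

-- From start index 16 on, the skip test never fires: the loop appends everything.
theorem foldA_ge16 (xs : List Int) : ∀ (s : Int) (acc : List Int), 16 ≤ s →
    (PySem.List.enumerate xs s).foldl
      (fun new_labels (p : Int × Int) =>
        if p.1 = 6 ∨ p.1 = 14 ∨ p.1 = 15 then new_labels else new_labels ++ [p.2]) acc
    = acc ++ xs := by
  induction xs with
  | nil => intro s acc _; simp [PySem.List.enumerate]
  | cons x xs ih =>
    intro s acc hs
    rw [PySem.List.enumerate_cons]
    simp only [List.foldl_cons]
    rw [if_neg (by omega), ih (s + 1) (acc ++ [x]) (by omega)]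
    simp

-- Specialisation of foldA_ge16 at start index 16, usable as a simp lemma.
theorem foldA_16 (xs acc : List Int) :
    (PySem.List.enumerate xs 16).foldl
      (fun new_labels (p : Int × Int) =>
        if p.1 = 6 ∨ p.1 = 14 ∨ p.1 = 15 then new_labels else new_labels ++ [p.2]) acc
    = acc ++ xs := foldA_ge16 xs 16 acc le_rfl

-- ===== VERDICT (by name: the statement is the Claim_ definition above) =====
theorem filter_action_labels_spec : Claim_equal_filter_action_labels := by
  intro action_labels _
  unfold Spec_filter_action_labels filter_action_labels filter_action_labels_alt
  rcases action_labels with _ | ⟨x0, _ | ⟨x1, _ | ⟨x2, _ | ⟨x3, _ | ⟨x4, _ | ⟨x5, _ | ⟨x6, _ | ⟨x7, _ | ⟨x8, _ | ⟨x9, _ | ⟨x10, _ | ⟨x11, _ | ⟨x12, _ | ⟨x13, _ | ⟨x14, _ | ⟨x15, rest⟩⟩⟩⟩⟩⟩⟩⟩⟩⟩⟩⟩⟩⟩⟩⟩ <;>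
    simp [PySem.List.enumerate, PySem.List.slice, PySem.List.clampIdx, foldA_16]
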